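-- pv_equiv track=rewrite | github.com/pioushasan2305/sortOrders | staticpair.py | find_shared_field_pairs
-- ===== SOURCE A (Python) =====
-- def find_shared_field_pairs(tests):
--     shared_pairs = []
--     test_names = list(tests.keys())
--
--     for i in range(len(test_names)):
--         for j in range(len(test_names)):
--             if i != j:  # Ensure we're not comparing a test with itself
--                 test1, test2 = test_names[i], test_names[j]
--                 # Check if they share at least one field
--                 if any(field in tests[test1] for field in tests[test2]):
--                     shared_pairs.append([test1, test2])
--
--     return shared_pairs
-- ===== SOURCE B (Python) =====
-- def find_shared_field_pairs(tests):
--     # Inverted index field -> set of test names having it; then for each test,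
--     # union the index buckets of its fields once and emit partners in key order.
--     names = list(tests.keys())
--     index = {}
--     for name, fields in tests.items():
--         for f in fields:
--             index.setdefault(f, set()).add(name)
--     shared_pairs = []
--     for name, fields in tests.items():
--         partners = set()
--         for f in fields:
--             partners |= index[f]  # key always present: f was indexed for this very test
--         for other in names:
--             if other != name and other in partners:
--                 shared_pairs.append([name, other])
--     return shared_pairs
-- ===== Notes on version B (the rewrite author's own statement) =====
-- stated objective: faster
-- what changed: Replaces the per-pair any-field-in-list scan with an inverted index field->set of tests built once, so each test's partner set is a union of index buckets and the pair test becomes a set lookup.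
import Mathlib
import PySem

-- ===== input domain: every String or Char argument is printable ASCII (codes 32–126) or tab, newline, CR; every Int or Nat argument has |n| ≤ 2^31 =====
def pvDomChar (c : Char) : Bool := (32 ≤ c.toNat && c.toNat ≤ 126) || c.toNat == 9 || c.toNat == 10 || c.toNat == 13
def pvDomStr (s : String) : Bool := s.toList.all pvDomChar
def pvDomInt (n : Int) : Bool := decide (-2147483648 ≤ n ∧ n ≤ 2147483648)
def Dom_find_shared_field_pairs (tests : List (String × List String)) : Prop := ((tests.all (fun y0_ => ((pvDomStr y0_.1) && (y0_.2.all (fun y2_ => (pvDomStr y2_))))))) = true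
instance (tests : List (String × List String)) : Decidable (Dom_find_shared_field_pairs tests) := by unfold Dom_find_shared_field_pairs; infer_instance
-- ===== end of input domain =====

-- B replaces A's per-pair field scan with an inverted index field -> set of test names,
-- unioning index buckets per test; proved to return exactly A's pair list on every input.


-- ===== PORT A =====
-- dict argument: the association list is normalized into a PySem.Dict (Python dict semantics).
def find_shared_field_pairs (tests : List (String × List String)) : List (List String) :=
  let d := PySem.Dict.ofList tests
  let test_names := d.keys
  (PySem.List.enumerate test_names 0).foldl (fun shared_pairs pi =>
    (PySem.List.enumerate test_names 0).foldl (fun shared_pairs pj =>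
      if pi.1 ≠ pj.1 then
        if (d.getD pj.2 []).any (fun field => (d.getD pi.2 []).contains field)
        then shared_pairs ++ [[pi.2, pj.2]] else shared_pairs
      else shared_pairs) shared_pairs) []

-- ===== PORT B =====
-- index[f] in Source B is ported as getD: the key is always present at the lookup site.
def find_shared_field_pairs_alt (tests : List (String × List String)) : List (List String) :=
  let d := PySem.Dict.ofList tests
  let names := d.keys
  let index : PySem.Dict String (PySem.Set String) :=
    d.items.foldl (fun idx p =>
      p.2.foldl (fun idx f => idx.insert f (PySem.Set.add (idx.getD f PySem.Set.empty) p.1)) idx)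
      PySem.Dict.empty
  d.items.foldl (fun (shared_pairs : List (List String)) p =>
    let partners : PySem.Set String :=
      p.2.foldl (fun s f => PySem.Set.union s (index.getD f PySem.Set.empty)) PySem.Set.empty
    names.foldl (fun shared_pairs other =>
      if other ≠ p.1 ∧ PySem.Set.contains partners other then shared_pairs ++ [[p.1, other]]
      else shared_pairs) shared_pairs) []

-- ===== PRECONDITION & SPEC =====
def Spec_find_shared_field_pairs (tests : List (String × List String)) (out : List (List String)) : Prop := out = find_shared_field_pairs_alt tests
instance (tests : List (String × List String)) (out : List (List String)) : Decidable (Spec_find_shared_field_pairs tests out) := by unfold Spec_find_shared_field_pairs; infer_instance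

-- ===== CLAIM (what is proved, stated in full; the proofs are below) =====
def Claim_equal_find_shared_field_pairs : Prop := ∀ (tests : List (String × List String)), Dom_find_shared_field_pairs tests → Spec_find_shared_field_pairs tests (find_shared_field_pairs tests)

-- ===== LEMMAS AND PROOFS =====

-- fields of a test, looked up in the normalized dict
def pvF (d : PySem.Dict String (List String)) (t : String) : List String := d.getD t []

-- common canonical form of both programs: a doubly nested loop over the key list
def pvCanon (d : PySem.Dict String (List String)) (ks : List String) : List (List String) :=
  ks.foldl (fun acc t1 =>
    ks.foldl (fun acc t2 =>
      if t1 ≠ t2 ∧ ∃ f ∈ pvF d t2, f ∈ pvF d t1 then acc ++ [[t1, t2]] else acc) acc) []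

theorem pv_index_inner_mem (fs : List String) (name : String)
    (idx : PySem.Dict String (PySem.Set String)) (f n : String) :
    n ∈ (fs.foldl (fun idx g => idx.insert g (PySem.Set.add (idx.getD g PySem.Set.empty) name)) idx).getD f PySem.Set.empty
      ↔ n ∈ idx.getD f PySem.Set.empty ∨ (f ∈ fs ∧ n = name) := by
  induction fs generalizing idx with
  | nil => simp
  | cons g t ih =>
    simp only [List.foldl_cons, ih, PySem.Dict.getD_insert]
    by_cases hfg : f = g
    · subst hfg
      simp [PySem.Set.mem_add]
      tauto
    · simp only [if_neg hfg, List.mem_cons]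
      tauto

theorem pv_index_mem (l : List (String × List String))
    (idx : PySem.Dict String (PySem.Set String)) (f n : String) :
    n ∈ (l.foldl (fun idx p =>
          p.2.foldl (fun idx g => idx.insert g (PySem.Set.add (idx.getD g PySem.Set.empty) p.1)) idx) idx).getD f PySem.Set.empty
      ↔ n ∈ idx.getD f PySem.Set.empty ∨ ∃ p ∈ l, f ∈ p.2 ∧ n = p.1 := by
  induction l generalizing idx with
  | nil => simp
  | cons p t ih =>
    simp only [List.foldl_cons, ih, pv_index_inner_mem, List.mem_cons]
    constructor
    · rintro (((h | ⟨h1, h2⟩) | h)) 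
      · exact Or.inl h
      · exact Or.inr ⟨p, Or.inl rfl, h1, h2⟩
      · obtain ⟨q, hq, h⟩ := h
        exact Or.inr ⟨q, Or.inr hq, h⟩
    · rintro (h | ⟨q, (rfl | hq), h⟩)
      · exact Or.inl (Or.inl h)
      · exact Or.inl (Or.inr h)
      · exact Or.inr ⟨q, hq, h⟩

theorem pv_partners_mem (fs : List String) (index : PySem.Dict String (PySem.Set String))
    (s : PySem.Set String) (n : String) :
    n ∈ fs.foldl (fun s f => PySem.Set.union s (index.getD f PySem.Set.empty)) s
      ↔ n ∈ s ∨ ∃ f ∈ fs, n ∈ index.getD f PySem.Set.empty := by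
  induction fs generalizing s with
  | nil => simp
  | cons g t ih =>
    simp only [List.foldl_cons, ih, PySem.Set.mem_union, List.mem_cons]
    constructor
    · rintro ((h | h) | ⟨f, hf, h⟩)
      · exact Or.inl h
      · exact Or.inr ⟨g, Or.inl rfl, h⟩
      · exact Or.inr ⟨f, Or.inr hf, h⟩
    · rintro (h | ⟨f, (rfl | hf), h⟩)
      · exact Or.inl (Or.inl h)
      · exact Or.inl (Or.inr h)
      · exact Or.inr ⟨f, hf, h⟩

theorem pv_enum_fst_eq_iff {ks : List String} (hnd : ks.Nodup)
    {pi pj : Int × String} (hi : pi ∈ PySem.List.enumerate ks 0)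
    (hj : pj ∈ PySem.List.enumerate ks 0) : pi.1 = pj.1 ↔ pi.2 = pj.2 := by
  rw [PySem.List.mem_enumerate_iff] at hi hj
  obtain ⟨ki, hki, rfl⟩ := hi
  obtain ⟨kj, hkj, rfl⟩ := hj
  simp only [zero_add]
  rw [List.Nodup.getElem_inj_iff hnd]
  omega

theorem pv_foldl_enum_snd {β : Type} (ks : List String) (g : β → String → β) (init : β) :
    (PySem.List.enumerate ks 0).foldl (fun acc pj => g acc pj.2) init = ks.foldl g init := by
  conv_rhs => rw [← PySem.List.map_snd_enumerate ks 0]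
  rw [List.foldl_map]

theorem pv_A_eq_canon (tests : List (String × List String)) :
    find_shared_field_pairs tests = pvCanon (PySem.Dict.ofList tests) (PySem.Dict.ofList tests).keys := by
  unfold find_shared_field_pairs pvCanon
  set d := PySem.Dict.ofList tests with hd
  set ks := d.keys with hks
  have hnd : ks.Nodup := PySem.Dict.nodup_keys_ofList tests
  trans ((PySem.List.enumerate ks 0).foldl (fun acc pi =>
      (PySem.List.enumerate ks 0).foldl (fun acc pj =>
        if pi.2 ≠ pj.2 ∧ ∃ f ∈ pvF d pj.2, f ∈ pvF d pi.2 then acc ++ [[pi.2, pj.2]] else acc) acc) [])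
  · refine PySem.List.foldl_congr_mem _ _ _ _ (fun acc pi hpi => ?_)
    refine PySem.List.foldl_congr_mem _ _ _ _ (fun acc2 pj hpj => ?_)
    have hidx := pv_enum_fst_eq_iff hnd hpi hpj
    have hany : (((d.getD pj.2 []).any fun field => (d.getD pi.2 []).contains field) = true)
        ↔ (∃ f ∈ pvF d pj.2, f ∈ pvF d pi.2) := by
      simp [pvF, List.any_eq_true]
    by_cases h1 : pi.1 = pj.1
    · rw [if_neg (fun hne => hne h1), if_neg (fun hc => hc.1 (hidx.mp h1))]
    · have h2 : pi.2 ≠ pj.2 := fun h => h1 (hidx.mpr h)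
      rw [if_pos h1]
      by_cases h3 : ((d.getD pj.2 []).any fun field => (d.getD pi.2 []).contains field) = true
      · rw [if_pos h3, if_pos ⟨h2, hany.mp h3⟩]
      · rw [if_neg h3, if_neg (fun hc => h3 (hany.mpr hc.2))]
  · trans ((PySem.List.enumerate ks 0).foldl (fun acc pi =>
        ks.foldl (fun acc t2 =>
          if pi.2 ≠ t2 ∧ ∃ f ∈ pvF d t2, f ∈ pvF d pi.2 then acc ++ [[pi.2, t2]] else acc) acc) [])
    · refine PySem.List.foldl_congr_mem _ _ _ _ (fun acc pi _ => ?_)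
      exact pv_foldl_enum_snd ks (fun acc t2 =>
        if pi.2 ≠ t2 ∧ ∃ f ∈ pvF d t2, f ∈ pvF d pi.2 then acc ++ [[pi.2, t2]] else acc) acc
    · exact pv_foldl_enum_snd ks (fun acc t1 => ks.foldl (fun acc t2 =>
        if t1 ≠ t2 ∧ ∃ f ∈ pvF d t2, f ∈ pvF d t1 then acc ++ [[t1, t2]] else acc) acc) []

theorem pv_B_eq_canon (tests : List (String × List String)) :
    find_shared_field_pairs_alt tests = pvCanon (PySem.Dict.ofList tests) (PySem.Dict.ofList tests).keys := by
  unfold find_shared_field_pairs_alt pvCanon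
  set d := PySem.Dict.ofList tests with hd
  set ks := d.keys with hks
  have hnd : ks.Nodup := PySem.Dict.nodup_keys_ofList tests
  have hitems : d.items = ks.map (fun k => (k, d.getD k [])) := PySem.Dict.items_eq_map_keys d hnd []
  simp only []
  rw [hitems, List.foldl_map]
  refine PySem.List.foldl_congr_mem _ _ _ _ (fun acc t1 ht1 => ?_)
  refine PySem.List.foldl_congr_mem _ _ _ _ (fun acc2 other hother => ?_)
  -- membership in the unioned partner set, for other ∈ ks
  have hpart : (PySem.Set.contains
      ((d.getD t1 []).foldl (fun s f =>
        PySem.Set.union s (((ks.map (fun k => (k, d.getD k []))).foldl (fun idx p =>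
          p.2.foldl (fun idx f => idx.insert f (PySem.Set.add (idx.getD f PySem.Set.empty) p.1)) idx)
          PySem.Dict.empty).getD f PySem.Set.empty)) PySem.Set.empty) other = true)
      ↔ (∃ f ∈ pvF d t1, f ∈ pvF d other) := by
    constructor
    · intro h
      rcases (pv_partners_mem _ _ _ _).mp ((PySem.Set.contains_iff _ _).mp h) with h1 | ⟨f, hf, hmem⟩
      · exact absurd h1 List.not_mem_nil
      · rcases (pv_index_mem _ _ _ _).mp hmem with hm | ⟨p, hp, hfp, rfl⟩
        · rw [PySem.Dict.getD_empty] at hm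
          exact absurd hm List.not_mem_nil
        · obtain ⟨k, hk, hkk⟩ := List.mem_map.mp hp
          cases hkk
          exact ⟨f, hf, hfp⟩
    · rintro ⟨f, hf, hmem⟩
      apply (PySem.Set.contains_iff _ _).mpr
      apply (pv_partners_mem _ _ _ _).mpr
      exact Or.inr ⟨f, hf, (pv_index_mem _ _ _ _).mpr
        (Or.inr ⟨(other, d.getD other []), List.mem_map.mpr ⟨other, hother, rfl⟩, hmem, rfl⟩)⟩
  by_cases hne : other = t1
  · simp [hne]
  · by_cases hsh : ∃ f ∈ pvF d t1, f ∈ pvF d other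
    · have hsw : ∃ f ∈ pvF d other, f ∈ pvF d t1 := by
        obtain ⟨f, h1, h2⟩ := hsh; exact ⟨f, h2, h1⟩
      simp only [ne_eq, hne, not_false_iff, true_and, Ne.symm hne]
      rw [if_pos (hpart.mpr hsh), if_pos hsw]
    · have hsw : ¬ ∃ f ∈ pvF d other, f ∈ pvF d t1 := by
        rintro ⟨f, h1, h2⟩; exact hsh ⟨f, h2, h1⟩
      simp only [ne_eq, hne, not_false_iff, true_and, Ne.symm hne]
      rw [if_neg (fun h => hsh (hpart.mp h)), if_neg hsw]

-- ===== VERDICT (by name: the statement is the Claim_ definition above) =====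
theorem find_shared_field_pairs_spec : Claim_equal_find_shared_field_pairs := by
  intro tests _
  unfold Spec_find_shared_field_pairs
  rw [pv_A_eq_canon, pv_B_eq_canon]
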